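-- pv_equiv track=rewrite | github.com/sebkeil/KR-Project01-Group02 | final_working_version/heur.py | moms_heuristic
-- ===== SOURCE A (Python) =====
-- def f(clauses, literal):
--     smallest_clauses_size = len(min(clauses, key=len))
--     number_of_occurances = 0
--     for clause in clauses:
--         if len(clause) == smallest_clauses_size:
--             if literal in clause: # or -literal in clause:
--                 number_of_occurances += 1
--     return number_of_occurances
--
-- def moms_heuristic(atoms, k, clauses):  # atoms = argments?, k=2
--     max_val = 0
--     chosen_literal = None
--     for atom in atoms:
--         function_res = (f(clauses, atom) + f(clauses, -atom))*(2**k) + (f(clauses, atom) * f(clauses, -atom))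
--         if function_res > max_val:
--             max_val = function_res
--             chosen_literal = atom
--     return chosen_literal
-- ===== SOURCE B (Python) =====
-- def moms_heuristic(atoms, k, clauses):
--     # One pass over the clauses builds a count of literal occurrences in the
--     # minimum-size clauses; then a single scan over the atoms picks the winner.
--     if not atoms:
--         return None
--     m = min(len(c) for c in clauses)
--     lits = [l for c in clauses if len(c) == m for l in dict.fromkeys(c)]
--     cnt = {}
--     for l in lits:
--         cnt[l] = cnt.get(l, 0) + 1
--     w = 2 ** k
--     best_val = 0
--     best = None
--     for a in atoms:
--         p = cnt.get(a, 0)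
--         n = cnt.get(-a, 0)
--         s = (p + n) * w + p * n
--         if s > best_val:
--             best_val = s
--             best = a
--     return best
-- ===== Notes on version B (the rewrite author's own statement) =====
-- stated objective: faster
-- what changed: B computes the minimum clause size and a literal-occurrence counter over the smallest clauses once, then scores each atom by two dictionary lookups, instead of A's four full scans of all clauses (each recomputing the minimum) per atom.
-- outside the precondition, e.g. on moms_heuristic([1], 0, []): A raises ValueError, B raises ValueError; on moms_heuristic([1], -1, [[1]]): A returns 1, B returns 1
import Mathlib
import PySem

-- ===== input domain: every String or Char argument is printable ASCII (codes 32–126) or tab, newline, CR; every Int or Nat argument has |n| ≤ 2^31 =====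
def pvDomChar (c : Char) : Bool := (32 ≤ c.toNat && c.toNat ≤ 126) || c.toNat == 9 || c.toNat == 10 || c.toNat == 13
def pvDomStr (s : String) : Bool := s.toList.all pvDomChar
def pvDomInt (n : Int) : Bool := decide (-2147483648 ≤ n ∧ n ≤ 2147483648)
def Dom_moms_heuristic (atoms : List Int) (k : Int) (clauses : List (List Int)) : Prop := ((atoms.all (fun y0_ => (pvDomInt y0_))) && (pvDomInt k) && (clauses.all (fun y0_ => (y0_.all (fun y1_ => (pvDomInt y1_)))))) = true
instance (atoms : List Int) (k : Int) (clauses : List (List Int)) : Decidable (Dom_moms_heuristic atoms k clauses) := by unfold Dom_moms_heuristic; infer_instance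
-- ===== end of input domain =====

-- B builds the min clause size and a literal counter over the smallest clauses in one
-- pass, then scores each atom by two lookups, instead of A's four clause scans per atom.

-- ===== PORT A =====
-- helper f of Source A; min(clauses, key=len) raises on [], excluded by Pre_
def pyF (clauses : List (List Int)) (literal : Int) : Int :=
  match PySem.List.min? clauses (fun c => (c.length : Int)) with
  | none => 0  -- unreachable under Pre_ (clauses ≠ [])
  | some mc =>
    let smallest : Int := mc.length
    clauses.foldl (fun acc clause =>
      if (clause.length : Int) = smallest then
        (if literal ∈ clause then acc + 1 else acc)
      else acc) 0

def moms_heuristic (atoms : List Int) (k : Int) (clauses : List (List Int)) : Option Int :=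
  (atoms.foldl (fun (st : Int × Option Int) atom =>
      let res : Int := (pyF clauses atom + pyF clauses (-atom)) * (2:Int) ^ k.toNat
                        + pyF clauses atom * pyF clauses (-atom)
      if res > st.1 then (res, some atom) else st)
    ((0 : Int), (none : Option Int))).2

-- ===== PORT B =====
-- flat list of literals of the minimum-size clauses, deduplicated per clause
def altLits (clauses : List (List Int)) : List Int :=
  let m : Int := match PySem.List.min? (clauses.map (fun c => (c.length : Int))) (fun x => x) with
    | none => 0  -- unreachable under Pre_
    | some v => v
  (clauses.filter (fun c => (c.length : Int) == m)).flatMap PySem.List.dedup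

def moms_heuristic_alt (atoms : List Int) (k : Int) (clauses : List (List Int)) : Option Int :=
  if atoms = [] then none else
  let cnt : PySem.Dict Int Int :=
    (altLits clauses).foldl (fun d l => d.modify l 0 (· + 1)) PySem.Dict.empty
  let w : Int := (2:Int) ^ k.toNat
  (atoms.foldl (fun (st : Int × Option Int) a =>
      let p := cnt.getD a 0
      let n := cnt.getD (-a) 0
      let s := (p + n) * w + p * n
      if s > st.1 then (s, some a) else st)
    ((0 : Int), (none : Option Int))).2

-- ===== PRECONDITION & SPEC =====
-- Pre_ excludes clauses = [] with atoms ≠ [], where A raises ValueError (min of an empty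
-- sequence), and k < 0, where Python evaluates 2**k as a float — a value outside the integer
-- semantics of the ports (A and B agree there in Python; the float power is not portable).
def Pre_moms_heuristic (atoms : List Int) (k : Int) (clauses : List (List Int)) : Prop :=
  (atoms = [] ∨ clauses ≠ []) ∧ 0 ≤ k
instance (atoms : List Int) (k : Int) (clauses : List (List Int)) : Decidable (Pre_moms_heuristic atoms k clauses) := by unfold Pre_moms_heuristic; infer_instance

def pvWitness_moms_heuristic : List Int × Int × List (List Int) := ([1, -2, 3], 2, [[1, -2], [2, 3], [-1]])

def Spec_moms_heuristic (atoms : List Int) (k : Int) (clauses : List (List Int)) (out : Option Int) : Prop := out = moms_heuristic_alt atoms k clauses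
instance (atoms : List Int) (k : Int) (clauses : List (List Int)) (out : Option Int) : Decidable (Spec_moms_heuristic atoms k clauses out) := by unfold Spec_moms_heuristic; infer_instance

-- ===== CLAIM (what is proved, stated in full; the proofs are below) =====
def Claim_equal_moms_heuristic : Prop := ∀ (atoms : List Int) (k : Int) (clauses : List (List Int)), Dom_moms_heuristic atoms k clauses → Pre_moms_heuristic atoms k clauses → Spec_moms_heuristic atoms k clauses (moms_heuristic atoms k clauses)

-- ===== LEMMAS AND PROOFS =====

theorem min?_map_aux (g : Option Int → Int → Option Int)
    (G : Option (List Int) → List Int → Option (List Int))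
    (hg1 : ∀ x, g none x = some x)
    (hg2 : ∀ m x, g (some m) x = if x < m then some x else some m)
    (hG1 : ∀ x, G none x = some x)
    (hG2 : ∀ m x, G (some m) x = if (x.length : Int) < (m.length : Int) then some x else some m)
    (clauses : List (List Int)) (acc : Option (List Int)) :
    List.foldl g (acc.map (fun c => (c.length : Int))) (clauses.map (fun c => (c.length : Int)))
    = (List.foldl G acc clauses).map (fun c => (c.length : Int)) := by
  induction clauses generalizing acc with
  | nil => rfl
  | cons c t ih =>
    cases acc with
    | none =>
      simp only [List.map_cons, List.foldl_cons, Option.map_none, hg1, hG1]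
      simpa using ih (some c)
    | some m =>
      simp only [List.map_cons, List.foldl_cons, Option.map_some, hg2, hG2]
      split_ifs with hlt
      · simpa using ih (some c)
      · simpa using ih (some m)

-- min over the mapped keys = key of the first min-by-key element
theorem min?_map_eq (clauses : List (List Int)) :
    PySem.List.min? (clauses.map (fun c => (c.length : Int))) (fun x => x)
      = (PySem.List.min? clauses (fun c => (c.length : Int))).map (fun c => (c.length : Int)) := by
  simp only [PySem.List.min?]
  refine min?_map_aux _ _ ?_ ?_ ?_ ?_ clauses none
  · intro x; rfl
  · intro m x; rfl
  · intro x; rfl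
  · intro m x; rfl

theorem count_dedup_mem (c : List Int) (lit : Int) :
    (PySem.List.dedup c).count lit = if lit ∈ c then 1 else 0 := by
  have hnd := PySem.List.nodup_dedup c
  have hm := PySem.List.mem_dedup c lit
  by_cases h : lit ∈ c
  · simp only [h, if_true]
    have := List.nodup_iff_count_le_one.mp hnd lit
    have hpos : 0 < (PySem.List.dedup c).count lit := List.count_pos_iff.mpr (hm.mpr h)
    omega
  · simp only [h, if_false]
    exact List.count_eq_zero.mpr (fun hx => h (hm.mp hx))

-- count of a literal in a per-clause-deduplicated flat list = A's membership count
theorem count_altLits (clauses : List (List Int)) (m : Int) (lit : Int) :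
    ∀ acc : Int,
    acc + ((((clauses.filter (fun c => (c.length : Int) == m)).flatMap PySem.List.dedup).count lit : Int))
      = clauses.foldl (fun acc clause =>
          if (clause.length : Int) = m then
            (if lit ∈ clause then acc + 1 else acc)
          else acc) acc := by
  induction clauses with
  | nil => intro acc; simp
  | cons c t ih =>
    intro acc
    simp only [List.foldl_cons, List.filter_cons]
    by_cases hc : (c.length : Int) = m
    · simp only [hc, beq_self_eq_true, if_true, List.flatMap_cons, List.count_append,
        count_dedup_mem]
      by_cases hm : lit ∈ c
      · simp only [hm, if_true, ← ih]
        push_cast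
        ring
      · simp only [hm, if_false, ← ih]
        push_cast
        ring
    · simp only [hc, if_false, beq_iff_eq, ← ih]

-- the counter lookup equals A's helper f
theorem getD_eq_pyF (clauses : List (List Int)) (h : clauses ≠ []) (lit : Int) :
    (((altLits clauses).foldl (fun d l => d.modify l 0 (· + 1)) PySem.Dict.empty).getD lit 0)
      = pyF clauses lit := by
  obtain ⟨mc, hmc⟩ : ∃ mc, PySem.List.min? clauses (fun c => (c.length : Int)) = some mc := by
    cases hx : PySem.List.min? clauses (fun c => (c.length : Int)) with
    | none => exact absurd ((PySem.List.min?_eq_none_iff clauses _).mp hx) h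
    | some mc => exact ⟨mc, rfl⟩
  rw [PySem.Dict.getD_foldl_modify_add_one]
  unfold altLits pyF
  rw [min?_map_eq, hmc]
  simp only [Option.map_some, PySem.Dict.getD_empty, zero_add]
  simpa using count_altLits clauses (mc.length : Int) lit 0

-- ===== VERDICT (by name: the statement is the Claim_ definition above) =====
theorem moms_heuristic_spec : Claim_equal_moms_heuristic := by
  intro atoms k clauses _ hpre
  unfold Spec_moms_heuristic
  by_cases hat : atoms = []
  · subst hat; rfl
  have hcl : clauses ≠ [] := by
    rcases hpre.1 with h | h
    · exact absurd h hat
    · exact h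
  unfold moms_heuristic moms_heuristic_alt
  simp only [hat, if_false]
  have hstep : (fun (st : Int × Option Int) (a : Int) =>
      let p := (((altLits clauses).foldl (fun d l => d.modify l 0 (· + 1)) PySem.Dict.empty).getD a 0)
      let n := (((altLits clauses).foldl (fun d l => d.modify l 0 (· + 1)) PySem.Dict.empty).getD (-a) 0)
      let s := (p + n) * (2:Int) ^ k.toNat + p * n
      if s > st.1 then (s, some a) else st)
      = (fun (st : Int × Option Int) (atom : Int) =>
      let res : Int := (pyF clauses atom + pyF clauses (-atom)) * (2:Int) ^ k.toNat
                        + pyF clauses atom * pyF clauses (-atom)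
      if res > st.1 then (res, some atom) else st) := by
    funext st a
    simp only [getD_eq_pyF clauses hcl]
  simp only [hstep]
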